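-- pv_equiv track=rewrite | github.com/NataliaTenorioMaia/Tests | Youtube_Video_Recommender/deploy/ml_utils.py | ch_appeal
-- ===== SOURCE A (Python) =====
-- def ch_appeal(channel_name):
--     list_3 = ['study','mit ','lex ','amini','proj','brunton']
--     list_2 = ['tedx','stanford','marr','youtube','online']
--     list_1 = ['school','sci','lab','google','krish','course']
--
--     l3 = [True for word in list_3 if word in channel_name]
--     l2 = [True for word in list_2 if word in channel_name]
--     l1 = [True for word in list_1 if word in channel_name]
--     if any(l3): return 3
--     elif any(l2): return 2
--     elif any(l1): return 1
--     else: return 0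
-- ===== SOURCE B (Python) =====
-- def ch_appeal(channel_name):
--     tiers = {'study': 3, 'mit ': 3, 'lex ': 3, 'amini': 3, 'proj': 3, 'brunton': 3,
--              'tedx': 2, 'stanford': 2, 'marr': 2, 'youtube': 2, 'online': 2,
--              'school': 1, 'sci': 1, 'lab': 1, 'google': 1, 'krish': 1, 'course': 1}
--     return max((tier for word, tier in tiers.items() if word in channel_name), default=0)
-- ===== Notes on version B (the rewrite author's own statement) =====
-- stated objective: simpler
-- what changed: Replaces the three per-tier membership comprehensions and the if/elif chain with a single flat keyword-to-tier table scanned once, returning the maximum matching tier (default 0).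
import Mathlib
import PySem

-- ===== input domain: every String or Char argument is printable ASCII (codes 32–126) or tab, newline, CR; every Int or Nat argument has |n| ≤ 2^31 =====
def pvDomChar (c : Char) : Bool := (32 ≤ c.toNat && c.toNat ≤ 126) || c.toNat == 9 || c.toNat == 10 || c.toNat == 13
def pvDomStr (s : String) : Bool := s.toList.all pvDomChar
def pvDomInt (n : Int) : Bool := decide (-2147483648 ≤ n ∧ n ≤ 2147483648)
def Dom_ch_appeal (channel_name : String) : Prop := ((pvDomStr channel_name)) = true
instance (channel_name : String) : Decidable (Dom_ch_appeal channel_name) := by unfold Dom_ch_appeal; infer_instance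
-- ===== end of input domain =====

-- B replaces A's three per-tier comprehensions and if/elif chain by one flat
-- keyword→tier table scanned once, taking the maximum matching tier (objective: simpler).


-- ===== PORT A =====
def ch_appeal (channel_name : String) : Int :=
  let list_3 : List String := ["study", "mit ", "lex ", "amini", "proj", "brunton"]
  let list_2 : List String := ["tedx", "stanford", "marr", "youtube", "online"]
  let list_1 : List String := ["school", "sci", "lab", "google", "krish", "course"]
  -- [True for word in list if word in channel_name]
  let l3 : List Bool := (list_3.filter (fun word => PySem.Str.isIn word channel_name)).map (fun _ => true)
  let l2 : List Bool := (list_2.filter (fun word => PySem.Str.isIn word channel_name)).map (fun _ => true)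
  let l1 : List Bool := (list_1.filter (fun word => PySem.Str.isIn word channel_name)).map (fun _ => true)
  if l3.any id then 3
  else if l2.any id then 2
  else if l1.any id then 1
  else 0

-- ===== PORT B =====
-- the dict literal of Source B as an insertion-ordered association list
def pvTiers : List (String × Int) :=
  [("study", 3), ("mit ", 3), ("lex ", 3), ("amini", 3), ("proj", 3), ("brunton", 3),
   ("tedx", 2), ("stanford", 2), ("marr", 2), ("youtube", 2), ("online", 2),
   ("school", 1), ("sci", 1), ("lab", 1), ("google", 1), ("krish", 1), ("course", 1)]

def ch_appeal_alt (channel_name : String) : Int :=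
  -- max((tier for word, tier in tiers.items() if word in channel_name), default=0)
  let matched : List Int := (pvTiers.filter (fun p => PySem.Str.isIn p.1 channel_name)).map Prod.snd
  (PySem.List.max? matched id).getD 0

-- ===== PRECONDITION & SPEC =====
def Spec_ch_appeal (channel_name : String) (out : Int) : Prop := out = ch_appeal_alt channel_name
instance (channel_name : String) (out : Int) : Decidable (Spec_ch_appeal channel_name out) := by unfold Spec_ch_appeal; infer_instance

-- ===== CLAIM (what is proved, stated in full; the proofs are below) =====
def Claim_equal_ch_appeal : Prop := ∀ (channel_name : String), Dom_ch_appeal channel_name → Spec_ch_appeal channel_name (ch_appeal channel_name)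

-- ===== LEMMAS AND PROOFS =====

-- Python max keeps the first extremal element: if the head dominates the tail, it is returned
theorem max?_cons_of_le (c : Int) (t : List Int) (h : ∀ x ∈ t, x ≤ c) :
    PySem.List.max? (c :: t) id = some c := by
  induction t with
  | nil => rfl
  | cons a t ih =>
    have ha : a ≤ c := h a (by simp)
    have step : PySem.List.max? (c :: a :: t) id = PySem.List.max? (c :: t) id := by
      simp [PySem.List.max?, List.foldl_cons, if_neg (by omega : ¬ c < a)]
    rw [step]
    exact ih (fun x hx => h x (by simp [hx]))

-- grouped maximum: m3 all 3s, m2 all 2s, m1 all 1s ⇒ max is the first nonempty group's tier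
theorem max_groups (m3 m2 m1 : List Int)
    (h3 : ∀ x ∈ m3, x = 3) (h2 : ∀ x ∈ m2, x = 2) (h1 : ∀ x ∈ m1, x = 1) :
    ((PySem.List.max? (m3 ++ m2 ++ m1) id).getD 0) =
      if m3 ≠ [] then 3 else if m2 ≠ [] then 2 else if m1 ≠ [] then 1 else 0 := by
  cases m3 with
  | cons a t =>
    have ha := h3 a (by simp)
    rw [if_pos (by simp : (a :: t : List Int) ≠ [])]
    rw [show (a :: t) ++ m2 ++ m1 = a :: (t ++ m2 ++ m1) by simp]
    rw [max?_cons_of_le a _ (fun x hx => by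
      simp only [List.mem_append] at hx
      have : x = 3 ∨ x = 2 ∨ x = 1 := by
        rcases hx with (hx | hx) | hx
        · exact Or.inl (h3 x (by simp [hx]))
        · exact Or.inr (Or.inl (h2 x hx))
        · exact Or.inr (Or.inr (h1 x hx))
      omega)]
    simp [ha]
  | nil =>
    rw [if_neg (by simp : ¬(([] : List Int) ≠ [])), List.nil_append]
    cases m2 with
    | cons a t =>
      have ha := h2 a (by simp)
      rw [if_pos (by simp : (a :: t : List Int) ≠ [])]
      rw [show (a :: t) ++ m1 = a :: (t ++ m1) by simp]
      rw [max?_cons_of_le a _ (fun x hx => by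
        simp only [List.mem_append] at hx
        have : x = 2 ∨ x = 1 := by
          rcases hx with hx | hx
          · exact Or.inl (h2 x (by simp [hx]))
          · exact Or.inr (h1 x hx)
        omega)]
      simp [ha]
    | nil =>
      rw [if_neg (by simp : ¬(([] : List Int) ≠ [])), List.nil_append]
      cases m1 with
      | cons a t =>
        have ha := h1 a (by simp)
        rw [if_pos (by simp : (a :: t : List Int) ≠ [])]
        rw [max?_cons_of_le a _ (fun x hx => by
          have := h1 x (by simp [hx]); omega)]
        simp [ha]
      | nil => simp [PySem.List.max?]

-- the flat table is the three keyword lists tagged with their tiers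
theorem pvTiers_eq :
    pvTiers = (["study", "mit ", "lex ", "amini", "proj", "brunton"].map (fun w => (w, (3 : Int))))
      ++ (["tedx", "stanford", "marr", "youtube", "online"].map (fun w => (w, (2 : Int))))
      ++ (["school", "sci", "lab", "google", "krish", "course"].map (fun w => (w, (1 : Int)))) := rfl

-- B's matched-tier list splits into the three tier groups of A
theorem matched_eq (s : String) :
    ((pvTiers.filter (fun p => PySem.Str.isIn p.1 s)).map Prod.snd) =
      ((["study", "mit ", "lex ", "amini", "proj", "brunton"].filter
          (fun w => PySem.Str.isIn w s)).map (fun _ => (3 : Int)))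
      ++ ((["tedx", "stanford", "marr", "youtube", "online"].filter
          (fun w => PySem.Str.isIn w s)).map (fun _ => (2 : Int)))
      ++ ((["school", "sci", "lab", "google", "krish", "course"].filter
          (fun w => PySem.Str.isIn w s)).map (fun _ => (1 : Int))) := by
  rw [pvTiers_eq, List.filter_append, List.filter_append, List.map_append, List.map_append,
    List.filter_map, List.filter_map, List.filter_map, List.map_map, List.map_map, List.map_map]
  rfl

theorem ch_appeal_spec : Claim_equal_ch_appeal := by
  intro s _
  unfold Spec_ch_appeal ch_appeal ch_appeal_alt
  simp only []
  rw [matched_eq s, max_groups _ _ _ (by simp) (by simp) (by simp)]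
  cases h3 : List.filter (fun word => PySem.Str.isIn word s)
      ["study", "mit ", "lex ", "amini", "proj", "brunton"] with
  | cons a t => simp
  | nil =>
    rw [if_neg (show ¬((([] : List String).map (fun _ => true)).any id = true) by simp),
      if_neg (show ¬(([] : List String).map (fun _ => (3 : Int)) ≠ []) by simp)]
    cases h2 : List.filter (fun word => PySem.Str.isIn word s)
        ["tedx", "stanford", "marr", "youtube", "online"] with
    | cons a t => simp
    | nil =>
      rw [if_neg (show ¬((([] : List String).map (fun _ => true)).any id = true) by simp),
        if_neg (show ¬(([] : List String).map (fun _ => (2 : Int)) ≠ []) by simp)]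
      cases h1 : List.filter (fun word => PySem.Str.isIn word s)
          ["school", "sci", "lab", "google", "krish", "course"] with
      | cons a t => simp
      | nil => simp
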